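-- pv_equiv track=rewrite | github.com/GaiaKoren/ARMY | Euler/p387.py | get_harsh_nums
-- ===== SOURCE A (Python) =====
-- def is_harsh(num):
--     return num % sum_of_digs(num) == 0
--
-- def sum_of_digs(num):
--     digs = str(num)
--     s = 0
--     for dig in digs:
--         s += int(dig)
--     return s
--
-- def get_harsh_nums(lim):
--     nums = [""]
--     j = 0
--     new_num = 0
--     while int(new_num) < lim:
--         for i in range(10):
--             new_num = nums[j] + str(i)
--             if int(new_num) >= lim:
--                 return nums[1:]
--             if new_num != "0" and is_harsh(int(new_num)):
--                 nums.append(new_num)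
--
--         j += 1
-- ===== SOURCE B (Python) =====
-- def sum_of_digs(num):
--     digs = str(num)
--     s = 0
--     for dig in digs:
--         s += int(dig)
--     return s
--
--
-- def get_harsh_nums(lim):
--     # depth-first recursive generation: from each Harshad seed digit, recursively
--     # extend v to children 10*v + d that are Harshad and below lim; sort numerically
--     found = []
--
--     def dfs(v):
--         found.append(v)
--         for d in range(10):
--             c = 10 * v + d
--             if c < lim and c % sum_of_digs(c) == 0:
--                 dfs(c)
--
--     for d in range(1, 10):
--         if d < lim and d % sum_of_digs(d) == 0:
--             dfs(d)
--     return [str(v) for v in sorted(found)]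
-- ===== Notes on version B (the rewrite author's own statement) =====
-- stated objective: alternative
-- what changed: A grows one flat breadth-first worklist of digit-strings read through a moving cursor, re-parses every candidate with int(), and returns a slice of the worklist at the first too-large candidate, so ascending order falls out of the queue; B generates the numbers depth-first by a recursive function on integers (recursing into children 10*v+d that are Harshad and below lim) and sorts the collected list numerically at the end.
-- outside the precondition, e.g. on get_harsh_nums(0): A returns None, B returns []
import Mathlib
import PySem

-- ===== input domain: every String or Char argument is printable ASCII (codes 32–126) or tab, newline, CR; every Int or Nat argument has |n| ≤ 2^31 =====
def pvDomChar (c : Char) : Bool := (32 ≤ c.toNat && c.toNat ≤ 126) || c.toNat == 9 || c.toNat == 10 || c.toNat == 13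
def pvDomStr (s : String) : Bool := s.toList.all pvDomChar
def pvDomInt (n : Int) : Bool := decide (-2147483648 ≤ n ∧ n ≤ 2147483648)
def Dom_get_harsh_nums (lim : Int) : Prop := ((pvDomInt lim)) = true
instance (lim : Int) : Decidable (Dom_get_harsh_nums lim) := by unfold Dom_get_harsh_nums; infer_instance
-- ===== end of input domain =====

-- B replaces A's in-order breadth-first worklist of digit-strings (cursor index, int()
-- re-parsing, early-return slice) by recursive depth-first generation over integers with a
-- final numeric sort (alternative).


-- ===== PORT A =====
-- sum_of_digs: digit-character sum of str(num); int(dig) on the single character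
-- (the .getD 0 is unreachable: both programs only call it on decimal digit characters)
def sum_of_digs (num : Int) : Int :=
  (PySem.Int.toChars num).foldl (fun s dig => s + (PySem.Int.ofChars? [dig]).getD 0) 0

def is_harsh (num : Int) : Bool := PySem.Int.mod num (sum_of_digs num) == 0

-- A's inner `for i in range(10)` loop.  Python's new_num is the string nums[j] + str(i);
-- A repeatedly re-parses it with int(new_num), so the port carries each worklist entry as
-- (string, its integer value): int(p + str(i)) = 10*int(p) + i for these canonical strings
-- (the head "" counts as value 0, exactly int("" + str(i)) = i).
-- Returns (some result) on A's early `return nums[1:]`, else (none, updated worklist).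
def a_for (lim : Int) (p : String × Int) :
    List Int → List (String × Int) → Option (List (String × Int)) × List (String × Int)
  | [], nums => (none, nums)
  | i :: rest, nums =>
    let nn : String × Int := (p.1 ++ PySem.Int.toStr i, 10 * p.2 + i)
    if nn.2 ≥ lim then (some (nums.drop 1), nums)
    else a_for lim p rest (if nn.1 ≠ "0" ∧ is_harsh nn.2 = true then nums ++ [nn] else nums)

-- A's `while int(new_num) < lim` loop; cur is int(new_num) (initially int(0) = 0; after a
-- completed inner loop new_num = nums[j] + "9", value 10*int(nums[j]) + 9).
-- fuel makes the recursion structural; lim.toNat + 1 iterations are proved sufficient.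
-- The two .getD / fuel-0 defaults are unreachable on Pre_; the final `else []` is the
-- path Python only reaches with lim ≤ 0 (where it returns None) — excluded by Pre_.
def a_while (fuel : Nat) (lim : Int) (nums : List (String × Int)) (j : Nat) (cur : Int) :
    List (String × Int) :=
  match fuel with
  | 0 => []
  | f + 1 =>
    if cur < lim then
      let p := (PySem.List.pyGet? nums j).getD ("", 0)
      match a_for lim p [0, 1, 2, 3, 4, 5, 6, 7, 8, 9] nums with
      | (some res, _) => res
      | (none, nums') => a_while f lim nums' (j + 1) (10 * p.2 + 9)
    else []

def get_harsh_nums (lim : Int) : List String :=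
  (a_while (lim.toNat + 1) lim [("", 0)] 0 0).map Prod.fst

-- ===== PORT B =====
-- Source B's recursive dfs(v): append v to found, then recurse into each child 10*v + d
-- (d = 0..9) that is below lim and Harshad.  The Nat fuel only makes the nested
-- recursion structural: every recursive call at least tenfolds v, so lim.toNat + 1
-- levels always suffice and the fuel-0 default is never reached on the admitted inputs.
def b_dfs (fuel : Nat) (lim v : Int) (found : List Int) : List Int :=
  match fuel with
  | 0 => found
  | f + 1 =>
    (PySem.List.pyRange 0 10 1).foldl
      (fun acc d =>
        if decide (10 * v + d < lim) &&
            (PySem.Int.mod (10 * v + d) (sum_of_digs (10 * v + d)) == 0) then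
          b_dfs f lim (10 * v + d) acc
        else acc)
      (found ++ [v])

-- Source B's seed loop `for d in range(1, 10)` and the final `[str(v) for v in sorted(found)]`
def get_harsh_nums_alt (lim : Int) : List String :=
  (PySem.List.sorted
    ((PySem.List.pyRange 1 10 1).foldl
      (fun found d =>
        if decide (d < lim) && (PySem.Int.mod d (sum_of_digs d) == 0) then
          b_dfs (lim.toNat + 1) lim d found
        else found)
      [])
    (fun v => v) false).map PySem.Int.toStr

-- ===== PRECONDITION & SPEC =====
-- Pre_ excludes lim ≤ 0, where A falls off the while loop and returns None, which is not a
-- value of the declared list-of-strings type (B returns [] there).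
def Pre_get_harsh_nums (lim : Int) : Prop := 1 ≤ lim
instance (lim : Int) : Decidable (Pre_get_harsh_nums lim) := by unfold Pre_get_harsh_nums; infer_instance
def pvWitness_get_harsh_nums : Int := 7

def Spec_get_harsh_nums (lim : Int) (out : List String) : Prop := out = get_harsh_nums_alt lim
instance (lim : Int) (out : List String) : Decidable (Spec_get_harsh_nums lim out) := by unfold Spec_get_harsh_nums; infer_instance

-- ===== CLAIM (what is proved, stated in full; the proofs are below) =====
def Claim_equal_get_harsh_nums : Prop := ∀ (lim : Int), Dom_get_harsh_nums lim → Pre_get_harsh_nums lim → Spec_get_harsh_nums lim (get_harsh_nums lim)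

-- ===== LEMMAS AND PROOFS =====
-- right-truncatability as a predicate (proof-side only: every right truncation is Harshad)
def all_trunc_go : Nat → Int → Bool
  | 0, _ => true
  | fuel + 1, n =>
    if 0 < n then is_harsh n && all_trunc_go fuel (PySem.Int.floordiv n 10) else true

def all_trunc_harsh (n : Int) : Bool := all_trunc_go n.toNat n

-- ===== scratch lemmas =====
def intRange (a b : Int) : List Int := (List.range (b - a).toNat).map (fun k : Nat => a + (k : Int))

theorem mem_intRange {a b x : Int} : x ∈ intRange a b ↔ a ≤ x ∧ x < b := by
  unfold intRange
  rw [List.mem_map]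
  constructor
  · rintro ⟨k, hk, rfl⟩
    rw [List.mem_range] at hk
    omega
  · rintro ⟨h1, h2⟩
    exact ⟨(x - a).toNat, List.mem_range.mpr (by omega), by omega⟩

theorem intRange_append {a b c : Int} (h1 : a ≤ b) (h2 : b ≤ c) :
    intRange a c = intRange a b ++ intRange b c := by
  have h : (c - a).toNat = (b - a).toNat + (c - b).toNat := by omega
  simp only [intRange, h, List.range_add, List.map_append, List.map_map]
  congr 1
  apply List.map_congr_left
  intro k hk
  simp only [Function.comp_apply]
  push_cast
  omega

theorem pairwise_intRange {a b : Int} : (intRange a b).Pairwise (· < ·) := by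
  apply List.Pairwise.map
  · intro x y h
    exact h
  · exact List.pairwise_lt_range.imp (by intro x y h; omega)

theorem toChars_nonneg (n : Int) (h : 0 ≤ n) :
    PySem.Int.toChars n = Nat.toDigits 10 n.toNat := by
  simp [PySem.Int.toChars, show ¬ n < 0 by omega]

theorem toChars_step (p d : Int) (hp : 1 ≤ p) (hd : 0 ≤ d) (hd9 : d ≤ 9) :
    PySem.Int.toChars p ++ PySem.Int.toChars d = PySem.Int.toChars (10 * p + d) := by
  rw [toChars_nonneg p (by omega), toChars_nonneg d (by omega), toChars_nonneg _ (by omega)]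
  have h10 : (10 * p + d).toNat = 10 * p.toNat + d.toNat := by omega
  rw [h10]
  exact Nat.toDigits_append_toDigits (by norm_num) (by omega) (by omega)

theorem toStr_step (p d : Int) (hp : 1 ≤ p) (hd : 0 ≤ d) (hd9 : d ≤ 9) :
    PySem.Int.toStr p ++ PySem.Int.toStr d = PySem.Int.toStr (10 * p + d) := by
  rw [PySem.Int.toStr.eq_1, PySem.Int.toStr.eq_1, PySem.Int.toStr.eq_1,
      ← String.ofList_append, toChars_step p d hp hd hd9]

theorem toStr_concat_ne_zero (p d : Int) (hp : 1 ≤ p) :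
    PySem.Int.toStr p ++ PySem.Int.toStr d ≠ "0" := by
  intro h
  have h2 : (PySem.Int.toStr p ++ PySem.Int.toStr d).toList = "0".toList := by rw [h]
  rw [String.toList_append, PySem.Int.toList_toStr, PySem.Int.toList_toStr] at h2
  have h3 : (PySem.Int.toChars p ++ PySem.Int.toChars d).length = 1 := by rw [h2]; rfl
  rw [List.length_append] at h3
  have h4 : 0 < (PySem.Int.toChars p).length := by
    rw [toChars_nonneg p (by omega)]; exact Nat.length_toDigits_pos
  have h5 : 0 < (PySem.Int.toChars d).length := by
    unfold PySem.Int.toChars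
    split
    · simp
    · exact Nat.length_toDigits_pos
  omega

theorem dsum_mul10 (v : Int) (hv : 1 ≤ v) : sum_of_digs (10 * v) = sum_of_digs v := by
  unfold sum_of_digs
  have h : PySem.Int.toChars (10 * v) = PySem.Int.toChars v ++ PySem.Int.toChars 0 := by
    rw [toChars_step v 0 hv (by omega) (by omega)]; ring_nf
  rw [h, List.foldl_append]
  have h0 : PySem.Int.toChars 0 = ['0'] := by decide
  rw [h0]
  simp
  decide

theorem all_trunc_go_congr : ∀ (f1 : Nat), ∀ (f2 : Nat) (n : Int),
    n.toNat ≤ f1 → n.toNat ≤ f2 → all_trunc_go f1 n = all_trunc_go f2 n := by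
  intro f1
  induction f1 with
  | zero =>
    intro f2 n h1 _
    have hn : ¬ 0 < n := by omega
    cases f2 with
    | zero => rfl
    | succ g => simp [all_trunc_go, hn]
  | succ f ih =>
    intro f2 n h1 h2
    by_cases hn : 0 < n
    · cases f2 with
      | zero => omega
      | succ g =>
        simp only [all_trunc_go, if_pos hn]
        have hq : PySem.Int.floordiv n 10 = n / 10 := PySem.Int.floordiv_eq_ediv_of_pos (by omega)
        rw [ih g (PySem.Int.floordiv n 10) (by rw [hq]; omega) (by rw [hq]; omega)]
    · cases f2 with
      | zero => simp [all_trunc_go, hn]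
      | succ g => simp [all_trunc_go, hn]

theorem th_pos (n : Int) (h : 0 < n) :
    all_trunc_harsh n = (is_harsh n && all_trunc_harsh (PySem.Int.floordiv n 10)) := by
  unfold all_trunc_harsh
  obtain ⟨k, hk⟩ : ∃ k, n.toNat = k + 1 := ⟨n.toNat - 1, by omega⟩
  rw [hk]
  simp only [all_trunc_go, if_pos h]
  congr 1
  have hq : PySem.Int.floordiv n 10 = n / 10 := PySem.Int.floordiv_eq_ediv_of_pos (by omega)
  exact all_trunc_go_congr k _ _ (by rw [hq]; omega) (le_refl _)

theorem harsh_of_th (v : Int) (hv : 0 < v) (h : all_trunc_harsh v = true) : is_harsh v = true := by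
  rw [th_pos v hv] at h
  exact (Bool.and_eq_true_iff.mp h).1

theorem harsh_mul10 (v : Int) (hv : 1 ≤ v) (h : is_harsh v = true) : is_harsh (10 * v) = true := by
  unfold is_harsh at h ⊢
  rw [beq_iff_eq, PySem.Int.mod_eq_zero_iff_dvd] at h ⊢
  rw [dsum_mul10 v hv]
  exact h.mul_left 10

theorem th_mul10 (v : Int) (hv : 1 ≤ v) (h : all_trunc_harsh v = true) :
    all_trunc_harsh (10 * v) = true := by
  rw [th_pos _ (by omega)]
  have hf : PySem.Int.floordiv (10 * v) 10 = v := by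
    rw [PySem.Int.floordiv_eq_ediv_of_pos (by omega)]
    omega
  rw [hf, harsh_mul10 v hv (harsh_of_th v (by omega) h), h]
  rfl

theorem th_child (p d : Int) (hp : 1 ≤ p) (hth : all_trunc_harsh p = true)
    (hd : 0 ≤ d) (hd9 : d ≤ 9) :
    all_trunc_harsh (10 * p + d) = is_harsh (10 * p + d) := by
  rw [th_pos _ (by omega)]
  have hf : PySem.Int.floordiv (10 * p + d) 10 = p := by
    rw [PySem.Int.floordiv_eq_ediv_of_pos (by omega)]
    omega
  rw [hf, hth, Bool.and_true]

theorem th_parent (c : Int) (hc : 10 ≤ c) (h : all_trunc_harsh c = true) :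
    all_trunc_harsh (c / 10) = true := by
  rw [th_pos _ (by omega), PySem.Int.floordiv_eq_ediv_of_pos (by omega)] at h
  exact (Bool.and_eq_true_iff.mp h).2

-- truncatable Harshad numbers in [1, N)
def outTH (N : Int) : List Int := (intRange 1 N).filter all_trunc_harsh

def encTH (v : Int) : String × Int := (PySem.Int.toStr v, v)

theorem mem_outTH {N x : Int} : x ∈ outTH N ↔ 1 ≤ x ∧ x < N ∧ all_trunc_harsh x = true := by
  simp only [outTH, List.mem_filter, mem_intRange]
  tauto

theorem pairwise_outTH {N : Int} : (outTH N).Pairwise (· < ·) :=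
  List.Pairwise.filter _ pairwise_intRange

theorem outTH_append {b c : Int} (h1 : 1 ≤ b) (h2 : b ≤ c) :
    outTH c = outTH b ++ (intRange b c).filter all_trunc_harsh := by
  rw [outTH, outTH, intRange_append h1 h2, List.filter_append]

theorem outTH_stable {N M : Int} (hN : 1 ≤ N) (hNM : N ≤ M)
    (hE : ∀ v ∈ outTH M, v < N) : outTH M = outTH N := by
  rw [outTH_append hN hNM, List.append_right_eq_self]
  rw [List.filter_eq_nil_iff]
  intro x hx hth
  have hm : x ∈ outTH M := by
    rw [mem_outTH]
    rw [mem_intRange] at hx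
    exact ⟨by omega, by omega, hth⟩
  have := hE x hm
  rw [mem_intRange] at hx
  omega

-- a strictly increasing list of integers ≥ 1 has i-th element ≥ i + 1
theorem sorted_index_ge (l : List Int) (h : l.Pairwise (· < ·)) (h1 : ∀ x ∈ l, 1 ≤ x) :
    ∀ (i : Nat) (hi : i < l.length), (i : Int) + 1 ≤ l[i] := by
  intro i
  induction i with
  | zero => intro hi; simpa using h1 l[0] (l.getElem_mem hi)
  | succ k ih =>
    intro hi
    have hk : k < l.length := by omega
    have hlt : l[k] < l[k + 1] := List.pairwise_iff_getElem.mp h k (k + 1) hk hi (by omega)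
    have := ih hk
    push_cast
    omega

-- no member of a strictly increasing list lies strictly between consecutive entries
theorem no_between (l : List Int) (h : l.Pairwise (· < ·)) (i : Nat) (hi : i + 1 < l.length)
    (q : Int) (hq : q ∈ l) (hgt : l[i] < q) : l[i + 1] ≤ q := by
  obtain ⟨k, hk, rfl⟩ := List.mem_iff_getElem.mp hq
  by_cases hki : k < i + 1
  · by_cases hke : k = i
    · subst hke; omega
    · have := List.pairwise_iff_getElem.mp h k i hk (by omega) (by omega)
      omega
  · by_cases hke : k = i + 1
    · subst hke; omega
    · have := List.pairwise_iff_getElem.mp h (i + 1) k (by omega) hk (by omega)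
      omega

theorem filt_map_range (p : Int) (m : Nat) :
    ((((List.range m).map (fun k : Nat => (k : Int))).filter
        (fun d => all_trunc_harsh (10 * p + d))).map (fun d => encTH (10 * p + d))) =
      ((intRange (10 * p) (10 * p + m)).filter all_trunc_harsh).map encTH := by
  have hr : intRange (10 * p) (10 * p + m) = (List.range m).map (fun k : Nat => 10 * p + (k : Int)) := by
    unfold intRange
    rw [show (10 * p + (m : Int) - 10 * p) = (m : Int) by ring, Int.toNat_natCast]
  rw [hr, List.filter_map, List.map_map, List.filter_map, List.map_map]
  rfl

theorem a_for_spec (lim p : Int) (hp : 1 ≤ p) (hth : all_trunc_harsh p = true) :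
    ∀ (ds : List Int) (nums : List (String × Int)), (∀ d ∈ ds, 0 ≤ d ∧ d ≤ 9) →
    a_for lim (PySem.Int.toStr p, p) ds nums =
      if ∀ d ∈ ds, 10 * p + d < lim then
        (none, nums ++ ((ds.filter (fun d => all_trunc_harsh (10 * p + d))).map
            (fun d => encTH (10 * p + d))))
      else
        (some ((nums ++ (((ds.takeWhile (fun d => decide (10 * p + d < lim))).filter
              (fun d => all_trunc_harsh (10 * p + d))).map (fun d => encTH (10 * p + d)))).drop 1),
         nums ++ (((ds.takeWhile (fun d => decide (10 * p + d < lim))).filter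
              (fun d => all_trunc_harsh (10 * p + d))).map (fun d => encTH (10 * p + d)))) := by
  intro ds
  induction ds with
  | nil =>
    intro nums _
    simp [a_for]
  | cons d rest ih =>
    intro nums hb
    have hd : 0 ≤ d ∧ d ≤ 9 := hb d (List.mem_cons_self ..)
    have henc : (PySem.Int.toStr p ++ PySem.Int.toStr d, 10 * p + d) = encTH (10 * p + d) := by
      unfold encTH
      rw [toStr_step p d hp hd.1 hd.2]
    by_cases hge : 10 * p + d ≥ lim
    · have hcond : ¬ ∀ x ∈ d :: rest, 10 * p + x < lim := by
        intro hall
        exact absurd (hall d (List.mem_cons_self ..)) (by omega)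
      rw [if_neg hcond]
      simp only [a_for, if_pos hge, List.takeWhile_cons]
      rw [decide_eq_false (by omega)]
      simp
    · have htw : (decide (10 * p + d < lim)) = true := decide_eq_true (by omega)
      simp only [a_for, if_neg hge]
      by_cases hth2 : all_trunc_harsh (10 * p + d) = true
      · have hcnd : (PySem.Int.toStr p ++ PySem.Int.toStr d ≠ "0" ∧ is_harsh (10 * p + d) = true) := by
          refine ⟨toStr_concat_ne_zero p d hp, ?_⟩
          rw [← th_child p d hp hth hd.1 hd.2]
          exact hth2
        rw [if_pos hcnd, ih (nums ++ [(PySem.Int.toStr p ++ PySem.Int.toStr d, 10 * p + d)])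
          (fun x hx => hb x (List.mem_cons_of_mem _ hx))]
        by_cases hrest : ∀ x ∈ rest, 10 * p + x < lim
        · rw [if_pos hrest, if_pos (by
            intro x hx
            rcases List.mem_cons.mp hx with rfl | hx
            · omega
            · exact hrest x hx)]
          simp [hth2, henc, List.append_assoc]
        · rw [if_neg hrest, if_neg (by
            intro hall
            exact hrest fun x hx => hall x (List.mem_cons_of_mem _ hx))]
          simp [htw, hth2, henc, List.append_assoc]
      · rw [if_neg (by
          rintro ⟨_, hh⟩
          rw [← th_child p d hp hth hd.1 hd.2] at hh
          exact hth2 hh)]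
        rw [ih nums (fun x hx => hb x (List.mem_cons_of_mem _ hx))]
        by_cases hrest : ∀ x ∈ rest, 10 * p + x < lim
        · rw [if_pos hrest, if_pos (by
            intro x hx
            rcases List.mem_cons.mp hx with rfl | hx
            · omega
            · exact hrest x hx)]
          simp [hth2]
        · rw [if_neg hrest, if_neg (by
            intro hall
            exact hrest fun x hx => hall x (List.mem_cons_of_mem _ hx))]
          simp [htw, hth2]

theorem tw_shift : ∀ (m : Nat) (b t : Int),
    ((List.range m).map (fun k : Nat => (k : Int))).takeWhile (fun d => decide (b + d < t)) =
      (List.range (min m (t - b).toNat)).map (fun k : Nat => (k : Int)) := by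
  intro m
  induction m with
  | zero => intro b t; simp
  | succ n ih =>
    intro b t
    rw [List.range_succ_eq_map]
    by_cases hb : b < t
    · have hmin : min (n + 1) (t - b).toNat = (min n (t - (b + 1)).toNat) + 1 := by omega
      rw [hmin, List.range_succ_eq_map]
      simp only [List.map_cons, List.takeWhile_cons, List.map_map]
      rw [decide_eq_true (by simpa using hb)]
      have hIH := ih (b + 1) t
      rw [List.takeWhile_map] at hIH ⊢
      have hfun : ((fun d => decide (b + d < t)) ∘ ((fun k : Nat => (k : Int)) ∘ Nat.succ)) =
          ((fun d => decide ((b + 1) + d < t)) ∘ (fun k : Nat => (k : Int))) := by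
        funext k
        simp only [Function.comp_apply, decide_eq_decide]
        push_cast
        omega
      have hinj : Function.Injective (fun k : Nat => (k : Int)) := fun a b hab => by
        simpa using hab
      have hcore : (List.range n).takeWhile
            ((fun d => decide ((b + 1) + d < t)) ∘ (fun k : Nat => (k : Int))) =
          List.range (min n (t - (b + 1)).toNat) :=
        (List.map_injective_iff.mpr hinj) hIH
      rw [hfun, hcore]
      simp
    · have hmin : min (n + 1) (t - b).toNat = 0 := by omega
      rw [hmin]
      simp only [List.map_cons, List.takeWhile_cons]
      rw [decide_eq_false (by simpa using hb)]
      simp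

theorem a_while_spec : ∀ (fuel : Nat) (lim p cur : Int) (j : Nat) (nums : List (String × Int)),
    1 ≤ p → all_trunc_harsh p = true → 1 ≤ j →
    nums = ("", 0) :: (outTH (10 * p)).map encTH →
    (outTH (10 * p))[j - 1]? = some p →
    (∀ v ∈ outTH (10 * p), v < lim) →
    cur < lim → 1 ≤ fuel → lim.toNat + 1 ≤ fuel + 10 * j →
    a_while fuel lim nums j cur = (outTH lim).map encTH := by
  intro fuel
  induction fuel with
  | zero => intro lim p cur j nums _ _ _ _ _ _ _ hf _; omega
  | succ f ih =>
    intro lim p cur j nums hp hth hj hnums hjget hE hcur _ hfuel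
    have hjlen : j - 1 < (outTH (10 * p)).length ∧ (outTH (10 * p))[j-1]'(by
        exact (List.getElem?_eq_some_iff.mp hjget).1) = p := by
      obtain ⟨h1, h2⟩ := List.getElem?_eq_some_iff.mp hjget
      exact ⟨h1, h2⟩
    have hpj : j ≤ p := by
      have hge := sorted_index_ge (outTH (10 * p)) pairwise_outTH
        (fun x hx => (mem_outTH.mp hx).1) (j - 1) hjlen.1
      rw [hjlen.2] at hge
      omega
    have hpe : (PySem.List.pyGet? nums (j : Int)).getD ("", 0) = (PySem.Int.toStr p, p) := by
      rw [hnums, PySem.List.pyGet?_natCast]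
      obtain ⟨k, hk⟩ : ∃ k, j = k + 1 := ⟨j - 1, by omega⟩
      subst hk
      rw [List.getElem?_cons_succ, List.getElem?_map]
      simp only [Nat.add_sub_cancel] at hjget
      rw [hjget]
      rfl
    have hdig : ∀ d ∈ ([0,1,2,3,4,5,6,7,8,9] : List Int), 0 ≤ d ∧ d ≤ 9 := by decide
    have hdl : ([0,1,2,3,4,5,6,7,8,9] : List Int) =
        (List.range 10).map (fun k : Nat => (k : Int)) := by decide
    simp only [a_while, if_pos hcur, hpe]
    rw [a_for_spec lim p hp hth _ nums hdig]
    by_cases hlt : 10 * p + 9 < lim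
    · rw [if_pos (by intro d hd; have := hdig d hd; omega)]
      have hfl : ((([0,1,2,3,4,5,6,7,8,9] : List Int).filter
            (fun d => all_trunc_harsh (10 * p + d))).map (fun d => encTH (10 * p + d))) =
          ((intRange (10 * p) (10 * p + 10)).filter all_trunc_harsh).map encTH := by
        rw [hdl, filt_map_range]
        norm_num
      have hO' : outTH (10 * p + 10) =
          outTH (10 * p) ++ (intRange (10 * p) (10 * p + 10)).filter all_trunc_harsh :=
        outTH_append (by omega) (by omega)
      have hmem10 : 10 * p ∈ (intRange (10 * p) (10 * p + 10)).filter all_trunc_harsh := by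
        rw [List.mem_filter, mem_intRange]
        exact ⟨⟨by omega, by omega⟩, th_mul10 p hp hth⟩
      have hlen' : j < (outTH (10 * p + 10)).length := by
        rw [hO', List.length_append]
        have := List.length_pos_of_mem hmem10
        omega
      set p' := (outTH (10 * p + 10))[j]'hlen' with hp'def
      have hjmq : (outTH (10 * p + 10))[j-1]? = some p := by
        rw [hO', List.getElem?_append, if_pos hjlen.1]
        exact List.getElem?_eq_some_iff.mpr ⟨hjlen.1, hjlen.2⟩
      have hjm : (outTH (10 * p + 10))[j-1]'(by omega) = p := by
        obtain ⟨_, h2⟩ := List.getElem?_eq_some_iff.mp hjmq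
        exact h2
      have hpp' : p < p' := by
        have := List.pairwise_iff_getElem.mp pairwise_outTH (j-1) j (by omega) hlen' (by omega)
        rw [hjm] at this
        exact this
      have hp'mem : p' ∈ outTH (10 * p + 10) := List.getElem_mem hlen'
      have hp'props := mem_outTH.mp hp'mem
      have hkey : outTH (10 * p') = outTH (10 * p + 10) := by
        rw [outTH_append (b := 10 * p + 10) (by omega) (by omega), List.append_right_eq_self,
          List.filter_eq_nil_iff]
        intro c hc hthc
        rw [mem_intRange] at hc
        have hq : all_trunc_harsh (c / 10) = true := th_parent c (by omega) hthc
        have hq1 : p + 1 ≤ c / 10 := by omega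
        have hq2 : c / 10 < p' := by omega
        have hqmem : c / 10 ∈ outTH (10 * p + 10) :=
          mem_outTH.mpr ⟨by omega, by omega, hq⟩
        have hnb := no_between (outTH (10 * p + 10)) pairwise_outTH (j - 1)
          (by omega) (c / 10) hqmem (by rw [hjm]; omega)
        have hidx : (outTH (10 * p + 10))[j-1+1]'(by omega) = (outTH (10 * p + 10))[j]'hlen' := by
          congr 1
          omega
        rw [hidx] at hnb
        omega
      have hE' : ∀ v ∈ outTH (10 * p + 10), v < lim := by
        intro v hv
        rw [hO', List.mem_append] at hv
        rcases hv with hv | hv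
        · exact hE v hv
        · rw [List.mem_filter, mem_intRange] at hv
          omega
      rw [hfl]
      have harg : nums ++ ((intRange (10 * p) (10 * p + 10)).filter all_trunc_harsh).map encTH =
          ("", 0) :: (outTH (10 * p')).map encTH := by
        rw [hnums, hkey, hO', List.map_append]
        rfl
      rw [harg]
      exact ih lim p' (10 * p + 9) (j + 1) _ (by omega) hp'props.2.2 (by omega) rfl
        (by rw [show j + 1 - 1 = j from rfl, hkey]; exact List.getElem?_eq_some_iff.mpr ⟨hlen', rfl⟩)
        (by rw [hkey]; exact hE') hlt (by omega) (by omega)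
    · rw [if_neg (by
        intro hall
        have := hall 9 (by decide)
        omega)]
      have hlim1 : 1 ≤ lim := by
        have := hE p (mem_outTH.mpr ⟨hp, by omega, hth⟩)
        omega
      have htwf : ((([0,1,2,3,4,5,6,7,8,9] : List Int).takeWhile
              (fun d => decide (10 * p + d < lim))).filter
            (fun d => all_trunc_harsh (10 * p + d))).map (fun d => encTH (10 * p + d)) =
          ((intRange (10 * p) (10 * p + (min 10 (lim - 10 * p).toNat : Nat))).filter
            all_trunc_harsh).map encTH := by
        rw [hdl, tw_shift, filt_map_range]
      rw [htwf]
      have hout : outTH lim = outTH (10 * p) ++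
          ((intRange (10 * p) (10 * p + (min 10 (lim - 10 * p).toNat : Nat))).filter
            all_trunc_harsh) := by
        by_cases hple : 10 * p < lim
        · have hm : 10 * p + ((min 10 (lim - 10 * p).toNat : Nat) : Int) = lim := by omega
          rw [hm]
          exact outTH_append (by omega) (by omega)
        · have hm : 10 * p + ((min 10 (lim - 10 * p).toNat : Nat) : Int) = 10 * p := by omega
          rw [hm]
          have hstab := outTH_stable hlim1 (by omega) hE
          rw [hstab]
          simp [intRange]
      rw [hnums, hout, List.map_append]
      rfl

theorem empty_append_toStr (d : Int) : ("" : String) ++ PySem.Int.toStr d = PySem.Int.toStr d := by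
  simp

theorem a_for_spec0 (lim : Int) (h : 10 ≤ lim) :
    ∀ (ds : List Int) (nums : List (String × Int)), (∀ d ∈ ds, 0 ≤ d ∧ d ≤ 9) →
    a_for lim ("", 0) ds nums =
      (none, nums ++ ((ds.filter (fun d => decide (1 ≤ d) && all_trunc_harsh d)).map encTH)) := by
  intro ds
  induction ds with
  | nil => intro nums _; simp [a_for]
  | cons d rest ih =>
    intro nums hb
    have hd : 0 ≤ d ∧ d ≤ 9 := hb d (List.mem_cons_self ..)
    simp only [a_for]
    rw [if_neg (show ¬((10 * (("", 0) : String × Int).2 + d) ≥ lim) from by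
      show ¬(10 * (0 : Int) + d ≥ lim)
      omega)]
    by_cases hd0 : d = 0
    · subst hd0
      rw [if_neg (by decide)]
      rw [ih nums (fun x hx => hb x (List.mem_cons_of_mem _ hx))]
      simp
    · have hth_eq : is_harsh (10 * (0:Int) + d) = all_trunc_harsh d := by
        rw [show 10 * (0:Int) + d = d by ring, th_pos d (by omega)]
        have hq : PySem.Int.floordiv d 10 = 0 := by
          rw [PySem.Int.floordiv_eq_ediv_of_pos (by omega)]
          omega
        rw [hq, show all_trunc_harsh 0 = true from rfl, Bool.and_true]
      have hne : ("" : String) ++ PySem.Int.toStr d ≠ "0" := by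
        rw [empty_append_toStr]
        have h1d : 1 ≤ d := by omega
        have h9d : d ≤ 9 := hd.2
        interval_cases d <;> decide
      have henc : (("" : String) ++ PySem.Int.toStr d, 10 * (0:Int) + d) = encTH d := by
        rw [empty_append_toStr, show 10 * (0:Int) + d = d by ring]
        rfl
      by_cases hth2 : all_trunc_harsh d = true
      · rw [if_pos ⟨hne, by rw [hth_eq]; exact hth2⟩,
          ih _ (fun x hx => hb x (List.mem_cons_of_mem _ hx))]
        simp [hth2, List.append_assoc, encTH, show (1:Int) ≤ d by omega]
      · rw [if_neg (by
          rintro ⟨_, hh⟩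
          rw [hth_eq] at hh
          exact hth2 hh), ih nums (fun x hx => hb x (List.mem_cons_of_mem _ hx))]
        simp [hth2]

theorem first_level_eq (lim : Int) (_h : 10 ≤ lim) :
    (([0,1,2,3,4,5,6,7,8,9] : List Int).filter (fun d => decide (1 ≤ d) && all_trunc_harsh d)) =
      outTH 10 := by
  have : outTH 10 = ([0,1,2,3,4,5,6,7,8,9] : List Int).filter
      (fun d => decide (1 ≤ d) && all_trunc_harsh d) := by
    unfold outTH
    rw [show intRange 1 10 = [1,2,3,4,5,6,7,8,9] from by decide]
    rw [show ([0,1,2,3,4,5,6,7,8,9] : List Int).filter (fun d => decide (1 ≤ d) && all_trunc_harsh d)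
        = ([1,2,3,4,5,6,7,8,9] : List Int).filter (fun d => decide (1 ≤ d) && all_trunc_harsh d) from by
      simp [List.filter]]
    apply List.filter_congr
    intro d hd
    have h1 : 1 ≤ d ∧ d ≤ 9 := by
      fin_cases hd <;> exact ⟨by norm_num, by norm_num⟩
    rw [decide_eq_true h1.1, Bool.true_and]
  exact this.symm

theorem a_result (lim : Int) (h1 : 1 ≤ lim) :
    a_while (lim.toNat + 1) lim [("", 0)] 0 0 = (outTH lim).map encTH := by
  by_cases h10 : lim < 10
  · interval_cases lim <;> decide
  · have hstep : a_while (lim.toNat + 1) lim [("", 0)] 0 0 =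
        a_while lim.toNat lim (("", 0) :: (outTH 10).map encTH) 1 9 := by
      simp only [a_while, if_pos (show (0 : Int) < lim by omega)]
      have hget : (PySem.List.pyGet? [(("" : String), (0 : Int))] ((0 : Nat) : Int)).getD ("", 0)
          = ("", 0) := by decide
      rw [hget, a_for_spec0 lim (by omega) _ _ (by decide), first_level_eq lim (by omega)]
      norm_num
    rw [hstep]
    exact a_while_spec lim.toNat lim 1 9 1 _ (by omega) (by decide) (by omega) (by norm_num)
      (by decide) (fun v hv => by have := (mem_outTH.mp hv).2.1; omega) (by omega) (by omega)
      (by omega)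

-- ===== B-side development: descendant relation of the DFS tree =====
theorem th_single (d : Int) (h1 : 1 ≤ d) (h9 : d ≤ 9) : all_trunc_harsh d = is_harsh d := by
  rw [th_pos d (by omega)]
  have hq : PySem.Int.floordiv d 10 = 0 := by
    rw [PySem.Int.floordiv_eq_ediv_of_pos (by omega)]
    omega
  rw [hq, show all_trunc_harsh 0 = true from rfl, Bool.and_true]

theorem mod_beq_eq_is_harsh (c : Int) :
    (PySem.Int.mod c (sum_of_digs c) == 0) = is_harsh c := rfl

theorem mem_digits0 {d : Int} : d ∈ ([0,1,2,3,4,5,6,7,8,9] : List Int) ↔ 0 ≤ d ∧ d ≤ 9 := by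
  simp only [List.mem_cons, List.not_mem_nil, or_false]
  omega

theorem mem_digits1 {d : Int} : d ∈ ([1,2,3,4,5,6,7,8,9] : List Int) ↔ 1 ≤ d ∧ d ≤ 9 := by
  simp only [List.mem_cons, List.not_mem_nil, or_false]
  omega

-- x truncates (by repeatedly dropping its last digit) to v
def isDesc (v x : Int) : Prop := ∃ k : Nat, x / 10 ^ k = v

theorem pow10_pos (k : Nat) : (0 : Int) < 10 ^ k := pow_pos (by norm_num) k

theorem desc_refl (x : Int) : isDesc x x := ⟨0, by simp⟩

theorem desc_le {v x : Int} (hx : 0 ≤ x) (h : isDesc v x) : v ≤ x := by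
  obtain ⟨k, rfl⟩ := h
  exact Int.ediv_le_self _ hx

theorem desc_step (x : Int) (k : Nat) : x / 10 ^ k / 10 = x / 10 ^ (k + 1) := by
  rw [Int.ediv_ediv_of_nonneg (le_of_lt (pow10_pos k)), pow_succ]

theorem desc_trans {v u x : Int} (h1 : isDesc u x) (h2 : isDesc v u) : isDesc v x := by
  obtain ⟨k, rfl⟩ := h1
  obtain ⟨j, rfl⟩ := h2
  exact ⟨k + j, by rw [pow_add, ← Int.ediv_ediv_of_nonneg (le_of_lt (pow10_pos k))]⟩

theorem desc_child {v x d : Int} (hd0 : 0 ≤ d) (hd9 : d ≤ 9) (_hv : 1 ≤ v)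
    (h : isDesc (10 * v + d) x) : isDesc v x :=
  desc_trans h ⟨1, by rw [pow_one]; omega⟩

-- every truncation (≥ 1) of a right-truncatable Harshad number is one
theorem th_desc {v x : Int} (_hx : 1 ≤ x) (hth : all_trunc_harsh x = true)
    (hv : 1 ≤ v) (hd : isDesc v x) : all_trunc_harsh v = true := by
  obtain ⟨k, rfl⟩ := hd
  revert hv
  induction k with
  | zero => intro _; simpa using hth
  | succ j ih =>
    intro hv
    rw [← desc_step] at hv ⊢
    have h10 : 10 ≤ x / 10 ^ j := by omega
    exact th_parent _ h10 (ih (by omega))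

theorem desc_of_le {x : Int} {k j : Nat} (h : k ≤ j) : isDesc (x / 10 ^ j) (x / 10 ^ k) :=
  ⟨j - k, by rw [Int.ediv_ediv_of_nonneg (le_of_lt (pow10_pos k)), ← pow_add,
    show k + (j - k) = j by omega]⟩

theorem desc_comparable {u u' x : Int} (h1 : isDesc u x) (h2 : isDesc u' x) :
    isDesc u' u ∨ isDesc u u' := by
  obtain ⟨k, rfl⟩ := h1
  obtain ⟨j, rfl⟩ := h2
  rcases Nat.le_total k j with h | h
  · exact Or.inl (desc_of_le h)
  · exact Or.inr (desc_of_le h)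

-- same-parent values are equal if one truncates to the other
theorem desc_parent_eq {u u' : Int} (hu : 1 ≤ u) (hu' : 1 ≤ u')
    (hdiv : u / 10 = u' / 10) (h : isDesc u' u) : u = u' := by
  obtain ⟨k, hk⟩ := h
  cases k with
  | zero => simpa using hk
  | succ j =>
    exfalso
    have hle : u / 10 / 10 ^ j ≤ u / 10 := Int.ediv_le_self _ (by omega)
    rw [show u / 10 / 10 ^ j = u / 10 ^ (j + 1) from by
      rw [Int.ediv_ediv_of_nonneg (by norm_num : (0:Int) ≤ 10), ← pow_succ']] at hle
    rw [hk] at hle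
    omega

theorem desc_disjoint {u u' x : Int} (hu : 1 ≤ u) (hu' : 1 ≤ u') (_hx : 0 ≤ x)
    (hdiv : u / 10 = u' / 10) (hne : u ≠ u') (h1 : isDesc u x) (h2 : isDesc u' x) : False := by
  rcases desc_comparable h1 h2 with h | h
  · exact hne (desc_parent_eq hu hu' hdiv h)
  · exact hne (desc_parent_eq hu' hu hdiv.symm h).symm

-- every positive integer truncates to a single digit
theorem leading_digit : ∀ (n : Nat) (x : Int), x.toNat ≤ n → 1 ≤ x →
    ∃ u, 1 ≤ u ∧ u ≤ 9 ∧ isDesc u x := by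
  intro n
  induction n with
  | zero => intro x h1 h2; omega
  | succ m ih =>
    intro x h1 h2
    by_cases hx : x ≤ 9
    · exact ⟨x, h2, hx, desc_refl x⟩
    · obtain ⟨u, hu1, hu9, k, hk⟩ := ih (x / 10) (by omega) (by omega)
      refine ⟨u, hu1, hu9, ⟨k + 1, ?_⟩⟩
      rw [pow_succ', ← Int.ediv_ediv_of_nonneg (by norm_num : (0:Int) ≤ 10), hk]

-- ===== the DFS collects exactly the truncatable Harshads descending from its root =====
theorem b_dfs_spec : ∀ (fuel : Nat) (lim v : Int) (found : List Int),
    1 ≤ v → v < lim → all_trunc_harsh v = true → lim ≤ v * 10 ^ fuel →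
    ∃ l, b_dfs fuel lim v found = found ++ l ∧ l.Nodup ∧
      (∀ x, x ∈ l ↔ x ∈ outTH lim ∧ isDesc v x) := by
  intro fuel
  induction fuel with
  | zero =>
    intro lim v found hv hvlim _ hfuel
    simp only [pow_zero, mul_one] at hfuel
    omega
  | succ f ih =>
    intro lim v found hv hvlim hth hfuel
    have inner : ∀ (ds : List Int) (acc : List Int),
        (∀ d ∈ ds, 0 ≤ d ∧ d ≤ 9) → ds.Nodup →
        ∃ l, ds.foldl
            (fun acc d =>
              if decide (10 * v + d < lim) &&
                  (PySem.Int.mod (10 * v + d) (sum_of_digs (10 * v + d)) == 0) then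
                b_dfs f lim (10 * v + d) acc
              else acc) acc = acc ++ l ∧ l.Nodup ∧
          (∀ x, x ∈ l ↔ x ∈ outTH lim ∧ ∃ d ∈ ds, isDesc (10 * v + d) x) := by
      intro ds
      induction ds with
      | nil =>
        intro acc _ _
        exact ⟨[], by simp⟩
      | cons d rest ihd =>
        intro acc hb hnd
        have hd : 0 ≤ d ∧ d ≤ 9 := hb d (List.mem_cons_self ..)
        simp only [List.foldl_cons]
        by_cases hcond : (decide (10 * v + d < lim) &&
            (PySem.Int.mod (10 * v + d) (sum_of_digs (10 * v + d)) == 0)) = true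
        · rw [if_pos hcond]
          obtain ⟨hclim, hch⟩ := Bool.and_eq_true_iff.mp hcond
          have hclim' : 10 * v + d < lim := of_decide_eq_true hclim
          have hcth : all_trunc_harsh (10 * v + d) = true := by
            rw [th_child v d hv hth hd.1 hd.2, ← mod_beq_eq_is_harsh]
            exact hch
          obtain ⟨l1, he1, hn1, hm1⟩ := ih lim (10 * v + d) acc (by omega) hclim' hcth (by
            have hp := le_of_lt (pow10_pos f)
            calc lim ≤ v * 10 ^ (f + 1) := hfuel
              _ = (10 * v) * 10 ^ f := by ring
              _ ≤ (10 * v + d) * 10 ^ f := by nlinarith)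
          rw [he1]
          obtain ⟨l2, he2, hn2, hm2⟩ := ihd (acc ++ l1)
            (fun x hx => hb x (List.mem_cons_of_mem _ hx)) (List.Nodup.of_cons hnd)
          refine ⟨l1 ++ l2, by rw [he2, List.append_assoc], ?_, ?_⟩
          · rw [List.nodup_append]
            refine ⟨hn1, hn2, ?_⟩
            intro x hx1 y hy2
            rintro rfl
            obtain ⟨hx1o, hx1d⟩ := (hm1 x).mp hx1
            obtain ⟨_, d', hd', hx2d⟩ := (hm2 x).mp hy2
            have hd'b : 0 ≤ d' ∧ d' ≤ 9 := hb d' (List.mem_cons_of_mem _ hd')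
            have hdne : d ≠ d' := by
              intro hdd
              exact (List.nodup_cons.mp hnd).1 (hdd ▸ hd')
            obtain ⟨hxa, hxb, _⟩ := mem_outTH.mp hx1o
            exact desc_disjoint (u := 10 * v + d) (u' := 10 * v + d') (by omega) (by omega)
              (by omega) (by omega) (by omega) hx1d hx2d
          · intro x
            rw [List.mem_append, hm1 x, hm2 x]
            constructor
            · rintro (⟨ho, hdx⟩ | ⟨ho, d', hd', hdx⟩)
              · exact ⟨ho, d, List.mem_cons_self .., hdx⟩
              · exact ⟨ho, d', List.mem_cons_of_mem _ hd', hdx⟩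
            · rintro ⟨ho, d', hd', hdx⟩
              rcases List.mem_cons.mp hd' with rfl | hd'
              · exact Or.inl ⟨ho, hdx⟩
              · exact Or.inr ⟨ho, d', hd', hdx⟩
        · rw [if_neg hcond]
          obtain ⟨l2, he2, hn2, hm2⟩ := ihd acc
            (fun x hx => hb x (List.mem_cons_of_mem _ hx)) (List.Nodup.of_cons hnd)
          refine ⟨l2, he2, hn2, ?_⟩
          intro x
          rw [hm2 x]
          constructor
          · rintro ⟨ho, d', hd', hdx⟩
            exact ⟨ho, d', List.mem_cons_of_mem _ hd', hdx⟩
          · rintro ⟨ho, d', hd', hdx⟩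
            rcases List.mem_cons.mp hd' with heq | hd'
            · exfalso
              rw [heq] at hdx
              obtain ⟨hxa, hxb, hxc⟩ := mem_outTH.mp ho
              apply hcond
              rw [Bool.and_eq_true_iff]
              constructor
              · by_contra hnl
                have hge : ¬ 10 * v + d < lim := by simpa using hnl
                have := desc_le (x := x) (by omega) hdx
                omega
              · rw [mod_beq_eq_is_harsh]
                exact harsh_of_th _ (by omega)
                  (th_desc (by omega) hxc (by omega) hdx)
            · exact ⟨ho, d', hd', hdx⟩
    simp only [b_dfs]
    rw [show PySem.List.pyRange 0 10 1 = [0,1,2,3,4,5,6,7,8,9] from by decide]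
    obtain ⟨l, he, hn, hm⟩ := inner [0,1,2,3,4,5,6,7,8,9] (found ++ [v])
      (fun d hd => mem_digits0.mp hd) (by decide)
    refine ⟨v :: l, by rw [he, List.append_assoc]; rfl, ?_, ?_⟩
    · rw [List.nodup_cons]
      refine ⟨?_, hn⟩
      intro hvl
      obtain ⟨ho, d, hdmem, hdx⟩ := (hm v).mp hvl
      obtain ⟨hd0, hd9⟩ := mem_digits0.mp hdmem
      have := desc_le (x := v) (by omega) hdx
      omega
    · intro x
      rw [List.mem_cons, hm x]
      constructor
      · rintro (rfl | ⟨ho, d, hdmem, hdx⟩)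
        · exact ⟨mem_outTH.mpr ⟨hv, hvlim, hth⟩, desc_refl x⟩
        · obtain ⟨hd0, hd9⟩ := mem_digits0.mp hdmem
          exact ⟨ho, desc_child hd0 hd9 hv hdx⟩
      · rintro ⟨ho, k, hk⟩
        cases k with
        | zero =>
          left
          simpa using hk
        | succ j =>
          right
          obtain ⟨hxa, hxb, hxc⟩ := mem_outTH.mp ho
          have hcv : x / 10 ^ j / 10 = v := by rw [desc_step]; exact hk
          refine ⟨ho, x / 10 ^ j - 10 * v, ?_, ?_⟩
          · rw [mem_digits0]
            omega
          · exact ⟨j, by omega⟩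

theorem b_found_spec (lim : Int) :
    ∃ R, (PySem.List.pyRange 1 10 1).foldl
        (fun found d =>
          if decide (d < lim) && (PySem.Int.mod d (sum_of_digs d) == 0) then
            b_dfs (lim.toNat + 1) lim d found
          else found) [] = R ∧ R.Nodup ∧ (∀ x, x ∈ R ↔ x ∈ outTH lim) := by
  have hroot : ∀ (ds : List Int) (acc : List Int),
      (∀ d ∈ ds, 1 ≤ d ∧ d ≤ 9) → ds.Nodup →
      ∃ l, ds.foldl
          (fun found d =>
            if decide (d < lim) && (PySem.Int.mod d (sum_of_digs d) == 0) then
              b_dfs (lim.toNat + 1) lim d found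
            else found) acc = acc ++ l ∧ l.Nodup ∧
        (∀ x, x ∈ l ↔ x ∈ outTH lim ∧ ∃ d ∈ ds, isDesc d x) := by
    intro ds
    induction ds with
    | nil =>
      intro acc _ _
      exact ⟨[], by simp⟩
    | cons d rest ihd =>
      intro acc hb hnd
      have hd : 1 ≤ d ∧ d ≤ 9 := hb d (List.mem_cons_self ..)
      simp only [List.foldl_cons]
      by_cases hcond : (decide (d < lim) && (PySem.Int.mod d (sum_of_digs d) == 0)) = true
      · rw [if_pos hcond]
        obtain ⟨hdlim, hdh⟩ := Bool.and_eq_true_iff.mp hcond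
        have hdlim' : d < lim := of_decide_eq_true hdlim
        have hdth : all_trunc_harsh d = true := by
          rw [th_single d hd.1 hd.2, ← mod_beq_eq_is_harsh]
          exact hdh
        have hfuel : lim ≤ d * 10 ^ (lim.toNat + 1) := by
          have h0 : (lim.toNat + 1) < 10 ^ (lim.toNat + 1) := Nat.lt_pow_self (by norm_num)
          have h1 : (lim.toNat : Int) < 10 ^ (lim.toNat + 1) := by
            have h2 : ((lim.toNat + 1 : Nat) : Int) ≤ ((10 ^ (lim.toNat + 1) : Nat) : Int) :=
              Int.ofNat_le.mpr (Nat.le_of_lt h0)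
            push_cast at h2
            omega
          have hl : lim ≤ (lim.toNat : Int) := Int.self_le_toNat lim
          have hP := pow10_pos (lim.toNat + 1)
          nlinarith [hd.1]
        obtain ⟨l1, he1, hn1, hm1⟩ := b_dfs_spec (lim.toNat + 1) lim d acc hd.1 hdlim' hdth hfuel
        rw [he1]
        obtain ⟨l2, he2, hn2, hm2⟩ := ihd (acc ++ l1)
          (fun x hx => hb x (List.mem_cons_of_mem _ hx)) (List.Nodup.of_cons hnd)
        refine ⟨l1 ++ l2, by rw [he2, List.append_assoc], ?_, ?_⟩
        · rw [List.nodup_append]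
          refine ⟨hn1, hn2, ?_⟩
          intro x hx1 y hy2
          rintro rfl
          obtain ⟨hx1o, hx1d⟩ := (hm1 x).mp hx1
          obtain ⟨_, d', hd', hx2d⟩ := (hm2 x).mp hy2
          have hd'b : 1 ≤ d' ∧ d' ≤ 9 := hb d' (List.mem_cons_of_mem _ hd')
          have hdne : d ≠ d' := by
            intro hdd
            exact (List.nodup_cons.mp hnd).1 (hdd ▸ hd')
          obtain ⟨hxa, hxb, _⟩ := mem_outTH.mp hx1o
          exact desc_disjoint (u := d) (u' := d') (by omega) (by omega) (by omega)
            (by omega) hdne hx1d hx2d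
        · intro x
          rw [List.mem_append, hm1 x, hm2 x]
          constructor
          · rintro (⟨ho, hdx⟩ | ⟨ho, d', hd', hdx⟩)
            · exact ⟨ho, d, List.mem_cons_self .., hdx⟩
            · exact ⟨ho, d', List.mem_cons_of_mem _ hd', hdx⟩
          · rintro ⟨ho, d', hd', hdx⟩
            rcases List.mem_cons.mp hd' with rfl | hd'
            · exact Or.inl ⟨ho, hdx⟩
            · exact Or.inr ⟨ho, d', hd', hdx⟩
      · rw [if_neg hcond]
        obtain ⟨l2, he2, hn2, hm2⟩ := ihd acc
          (fun x hx => hb x (List.mem_cons_of_mem _ hx)) (List.Nodup.of_cons hnd)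
        refine ⟨l2, he2, hn2, ?_⟩
        intro x
        rw [hm2 x]
        constructor
        · rintro ⟨ho, d', hd', hdx⟩
          exact ⟨ho, d', List.mem_cons_of_mem _ hd', hdx⟩
        · rintro ⟨ho, d', hd', hdx⟩
          rcases List.mem_cons.mp hd' with heq | hd'
          · exfalso
            rw [heq] at hdx
            obtain ⟨hxa, hxb, hxc⟩ := mem_outTH.mp ho
            apply hcond
            rw [Bool.and_eq_true_iff]
            constructor
            · by_contra hnl
              have hge : ¬ d < lim := by simpa using hnl
              have := desc_le (x := x) (by omega) hdx
              omega
            · rw [mod_beq_eq_is_harsh, ← th_single d hd.1 hd.2]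
              exact th_desc (by omega) hxc (by omega) hdx
          · exact ⟨ho, d', hd', hdx⟩
  rw [show PySem.List.pyRange 1 10 1 = [1,2,3,4,5,6,7,8,9] from by decide]
  obtain ⟨l, he, hn, hm⟩ := hroot [1,2,3,4,5,6,7,8,9] []
    (fun d hd => mem_digits1.mp hd) (by decide)
  refine ⟨l, by rw [he]; rfl, hn, ?_⟩
  intro x
  rw [hm x]
  constructor
  · rintro ⟨ho, _⟩
    exact ho
  · intro ho
    obtain ⟨hxa, hxb, hxc⟩ := mem_outTH.mp ho
    obtain ⟨u, hu1, hu9, hud⟩ := leading_digit x.toNat x (le_refl _) hxa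
    refine ⟨ho, u, ?_, hud⟩
    rw [mem_digits1]
    omega

theorem b_result (lim : Int) (_h1 : 1 ≤ lim) :
    get_harsh_nums_alt lim = (outTH lim).map PySem.Int.toStr := by
  unfold get_harsh_nums_alt
  obtain ⟨R, he, hn, hm⟩ := b_found_spec lim
  rw [he]
  have hperm : (outTH lim).Perm R :=
    (List.perm_ext_iff_of_nodup pairwise_outTH.nodup hn).mpr (fun x => (hm x).symm)
  exact congrArg (List.map PySem.Int.toStr)
    (PySem.List.sorted_id_eq_of_perm_of_pairwise R (outTH lim) hperm
      (pairwise_outTH.imp le_of_lt))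

theorem ports_agree (lim : Int) (h1 : 1 ≤ lim) : get_harsh_nums lim = get_harsh_nums_alt lim := by
  unfold get_harsh_nums
  rw [a_result lim h1, b_result lim h1, List.map_map]
  rfl

-- ===== VERDICT (by name: the statement is the Claim_ definition above) =====
theorem get_harsh_nums_spec : Claim_equal_get_harsh_nums := by
  intro lim _ hpre
  unfold Spec_get_harsh_nums
  exact ports_agree lim hpre
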